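-- pv_equiv track=rewrite | github.com/dimtsi/AoC2019 | Day18/day18.py | get_keys_per_region
-- ===== SOURCE A (Python) =====
-- def get_keys_per_region(start, adj):
--     visited = set()
--     q = [start]
--     region_keys = set()
--
--     while q:
--         elem = q.pop()
--         if elem.islower():
--             region_keys.add(elem)
--
--         visited.add(elem)
--         for neigh in adj[elem].keys():
--             if neigh not in visited:
--                 q.append(neigh)
--     return region_keys
-- ===== SOURCE B (Python) =====
-- def get_keys_per_region(start, adj):
--     visited = set()
--     region_keys = set()
--
--     def helper(node):
--         visited.add(node)
--         if node.islower():
--             region_keys.add(node)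
--         for neigh in reversed(adj[node]):
--             if neigh not in visited:
--                 helper(neigh)
--
--     helper(start)
--     return region_keys
-- ===== Notes on version B (the rewrite author's own statement) =====
-- stated objective: alternative
-- what changed: B replaces A's iterative worklist loop (explicit stack, re-pushed and re-processed entries, visited-filtering of neighbours before pushing) by a recursive DFS helper that marks a node visited, records it if lowercase, and recurses directly into each not-yet-visited neighbour on the call stack.
-- outside the precondition, e.g. on get_keys_per_region('a', {'a': {}, 'b': {'c': 1}}): A returns {'a'}, B returns {'a'}
import Mathlib
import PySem

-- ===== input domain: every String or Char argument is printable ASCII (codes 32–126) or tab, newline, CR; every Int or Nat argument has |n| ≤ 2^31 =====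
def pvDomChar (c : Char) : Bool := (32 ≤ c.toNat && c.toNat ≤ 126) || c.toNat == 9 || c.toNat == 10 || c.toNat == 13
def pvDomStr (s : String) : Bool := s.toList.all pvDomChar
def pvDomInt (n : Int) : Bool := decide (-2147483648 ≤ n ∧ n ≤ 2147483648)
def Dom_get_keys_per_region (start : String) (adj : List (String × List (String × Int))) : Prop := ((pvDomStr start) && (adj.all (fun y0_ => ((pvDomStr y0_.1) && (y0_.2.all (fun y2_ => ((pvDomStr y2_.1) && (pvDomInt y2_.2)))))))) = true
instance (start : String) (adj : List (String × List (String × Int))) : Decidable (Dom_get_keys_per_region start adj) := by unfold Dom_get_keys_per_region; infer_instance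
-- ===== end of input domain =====

-- B replaces A's explicit-stack worklist loop by a recursive DFS on the call stack
-- (objective: alternative decomposition, same asymptotic cost).

-- ===== PORT A =====

-- Python str.islower() ported by hand: at least one cased character and no uppercase one.
-- Exact on the printable-ASCII domain Dom_, where the cased characters are exactly 'a'-'z' and 'A'-'Z'.
def pvIslower (s : String) : Bool :=
  (s.toList.any fun c => 'a' ≤ c && c ≤ 'z') && (s.toList.all fun c => !('A' ≤ c && c ≤ 'Z'))

-- adj[elem].keys(): look up elem in the outer dict and list the inner dict's keys in order.
-- On a missing key Python raises KeyError (excluded by Pre_); the port proceeds with [].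
def pvNbrs (adj : List (String × List (String × Int))) (e : String) : List String :=
  (PySem.Dict.ofList (((PySem.Dict.ofList adj).get? e).getD [])).keys

-- fuel for both ports: 1 + Σ over the node universe (start and every neighbour name)
-- of (out-degree + 1); both the pop count of A's loop and the recursion depth of B fit under it.
def pvU (start : String) (adj : List (String × List (String × Int))) : List String :=
  start :: adj.flatMap (fun p => p.2.map Prod.fst)

def pvW (adj : List (String × List (String × Int))) (v : String) : Nat :=
  (pvNbrs adj v).length

def pvFuel (start : String) (adj : List (String × List (String × Int))) : Nat :=
  1 + (pvU start adj).foldl (fun a v => a + pvW adj v + 1) 0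

-- the while loop of A: state (q, visited, region_keys)
def pvLoopA (adj : List (String × List (String × Int))) :
    Nat → List String → PySem.Set String → PySem.Set String → PySem.Set String
  | 0, _, _, keys => keys
  | f + 1, q, vis, keys =>
    match PySem.List.pop? q with
    | none => keys
    | some (e, q') =>
      let keys' := if pvIslower e then PySem.Set.add keys e else keys
      let vis' := PySem.Set.add vis e
      let q'' := q' ++ (pvNbrs adj e).filter (fun n => !PySem.Set.contains vis' n)
      pvLoopA adj f q'' vis' keys'

def get_keys_per_region (start : String) (adj : List (String × List (String × Int))) : List String :=
  pvLoopA adj (pvFuel start adj) [start] PySem.Set.empty PySem.Set.empty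

-- ===== PORT B =====

-- helper(node): mark node visited, record it if lowercase, recurse into unvisited neighbours
-- (in reversed(adj[node]) order, as in Source B); state = (visited, region_keys).
def pvDfs (adj : List (String × List (String × Int))) :
    Nat → String → PySem.Set String × PySem.Set String → PySem.Set String × PySem.Set String
  | 0, _, st => st
  | f + 1, node, st =>
    let st' := (PySem.Set.add st.1 node,
                if pvIslower node then PySem.Set.add st.2 node else st.2)
    ((pvNbrs adj node).reverse).foldl
      (fun st n => if PySem.Set.contains st.1 n then st else pvDfs adj f n st) st'

def get_keys_per_region_alt (start : String) (adj : List (String × List (String × Int))) : List String :=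
  (pvDfs adj (pvFuel start adj) start (PySem.Set.empty, PySem.Set.empty)).2

-- ===== PRECONDITION & SPEC =====
-- Pre_ excludes inputs where start or some neighbour name in adj is not a key of adj: when such a
-- node is reachable both A and B raise KeyError there, and exact reachability is not a closed-form
-- condition, so this superset of the raising inputs is excluded (even though A still returns when
-- the missing name happens to be unreachable).
def Pre_get_keys_per_region (start : String) (adj : List (String × List (String × Int))) : Prop :=
  start ∈ adj.map Prod.fst ∧ ∀ p ∈ adj, ∀ n ∈ p.2, n.1 ∈ adj.map Prod.fst
instance (start : String) (adj : List (String × List (String × Int))) : Decidable (Pre_get_keys_per_region start adj) := by unfold Pre_get_keys_per_region; infer_instance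

def pvWitness_get_keys_per_region : String × (List (String × List (String × Int))) :=
  ("a", [("a", [("B", 1), ("c", 2)]), ("B", [("a", 3)]), ("c", []), ("d", [("c", 4)])])

def Spec_get_keys_per_region (start : String) (adj : List (String × List (String × Int))) (out : List String) : Prop := out = get_keys_per_region_alt start adj
instance (start : String) (adj : List (String × List (String × Int))) (out : List String) : Decidable (Spec_get_keys_per_region start adj out) := by unfold Spec_get_keys_per_region; infer_instance

-- ===== CLAIM (what is proved, stated in full; the proofs are below) =====
def Claim_equal_get_keys_per_region : Prop := ∀ (start : String) (adj : List (String × List (String × Int))), Dom_get_keys_per_region start adj → Pre_get_keys_per_region start adj → Spec_get_keys_per_region start adj (get_keys_per_region start adj)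

-- ===== LEMMAS AND PROOFS =====

-- the body of B's neighbour loop, named for the proofs
def pvStep (adj : List (String × List (String × Int))) (f : Nat)
    (st : PySem.Set String × PySem.Set String) (n : String) :
    PySem.Set String × PySem.Set String :=
  if PySem.Set.contains st.1 n then st else pvDfs adj f n st

theorem pv_dfs_succ (adj : List (String × List (String × Int))) (f : Nat) (node : String)
    (st : PySem.Set String × PySem.Set String) :
    pvDfs adj (f + 1) node st =
      ((pvNbrs adj node).reverse).foldl (pvStep adj f)
        (PySem.Set.add st.1 node,
         if pvIslower node then PySem.Set.add st.2 node else st.2) := rfl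

-- remaining-work measure for the fuel lemmas
def pvMeas (start : String) (adj : List (String × List (String × Int)))
    (vis : PySem.Set String) : Nat :=
  ((pvU start adj).toFinset \ vis.toFinset).card

-- popping from the end: inversion
theorem pv_pop_inv {α : Type} {q q' : List α} {e : α}
    (h : PySem.List.pop? q = some (e, q')) : q = q' ++ [e] := by
  cases hq : q.reverse with
  | nil => simp [List.reverse_eq_nil_iff] at hq; subst hq; simp [PySem.List.pop?] at h
  | cons x xs =>
    have : q = xs.reverse ++ [x] := by
      have := congrArg List.reverse hq; simpa using this
    subst this
    rw [PySem.List.pop?_last] at h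
    cases h; rfl

theorem pv_pop_none {α : Type} {q : List α} (h : PySem.List.pop? q = none) : q = [] := by
  cases hq : q.reverse with
  | nil => simpa [List.reverse_eq_nil_iff] using hq
  | cons x xs =>
    have : q = xs.reverse ++ [x] := by
      have := congrArg List.reverse hq; simpa using this
    subst this
    rw [PySem.List.pop?_last] at h
    cases h

-- splitting an occurrence that cannot lie in the appended part
theorem pv_split_append {α : Type} {q' P q1 q2 : List α} {v : α}
    (h : q' ++ P = q1 ++ v :: q2) (hv : v ∉ P) :
    ∃ q2a, q' = q1 ++ v :: q2a ∧ q2 = q2a ++ P := by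
  rcases List.append_eq_append_iff.mp h with ⟨a, _, ha2⟩ | ⟨c, hc1, hc2⟩
  · exact absurd (ha2 ▸ List.mem_append_right _ List.mem_cons_self) hv
  · cases c with
    | nil =>
      have hvq : v :: q2 = P := by simpa using hc2
      exact absurd (hvq ▸ List.mem_cons_self) hv
    | cons y ys =>
      obtain ⟨rfl, hq2⟩ : y = v ∧ q2 = ys ++ P := by
        have := hc2; simp at this; exact ⟨this.1.symm, this.2⟩
      exact ⟨ys, by rw [hc1], hq2⟩

theorem pv_mem_filter_not_contains {vis : PySem.Set String} {l : List String} {n : String} :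
    n ∈ l.filter (fun n => !PySem.Set.contains vis n) ↔ n ∈ l ∧ n ∉ vis := by
  simp [List.mem_filter]

-- Set.add on the toFinset level
theorem pv_toFinset_add (s : PySem.Set String) (x : String) :
    (PySem.Set.add s x).toFinset = insert x s.toFinset := by
  ext a
  simp [PySem.Set.mem_add, or_comm]

theorem pv_meas_le (start : String) (adj : List (String × List (String × Int)))
    {s t : PySem.Set String} (h : ∀ y ∈ s, y ∈ t) :
    pvMeas start adj t ≤ pvMeas start adj s := by
  apply Finset.card_le_card
  apply Finset.sdiff_subset_sdiff (Finset.Subset.refl _)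
  intro a ha
  simp only [List.mem_toFinset] at *
  exact h a ha

theorem pv_meas_add_lt (start : String) (adj : List (String × List (String × Int)))
    {s : PySem.Set String} {x : String} (hx : x ∈ pvU start adj) (hnx : x ∉ s) :
    pvMeas start adj (PySem.Set.add s x) < pvMeas start adj s := by
  unfold pvMeas
  rw [pv_toFinset_add, Finset.sdiff_insert]
  apply Finset.card_erase_lt_of_mem
  simp [List.mem_toFinset, hx, hnx]

-- Nat sum bookkeeping
theorem pv_foldl_sum (adj : List (String × List (String × Int))) :
    ∀ (l : List String) (a : Nat),
      l.foldl (fun a v => a + pvW adj v + 1) a = a + (l.map (fun v => pvW adj v + 1)).sum := by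
  intro l
  induction l with
  | nil => simp
  | cons x xs ih => intro a; simp [ih]; omega

theorem pv_map_sum_succ (g : String → Nat) :
    ∀ l : List String, (l.map (fun v => g v + 1)).sum = (l.map g).sum + l.length := by
  intro l; induction l with
  | nil => simp
  | cons x xs ih => simp [ih]; omega

theorem pv_finsum_le (g : String → Nat) :
    ∀ l : List String, (∑ v ∈ l.toFinset, g v) ≤ (l.map g).sum := by
  intro l; induction l with
  | nil => simp
  | cons a l ih =>
    simp only [List.toFinset_cons, List.map_cons, List.sum_cons]
    by_cases ha : a ∈ l.toFinset
    · rw [Finset.insert_eq_self.mpr ha]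
      omega
    · rw [Finset.sum_insert ha]
      omega

theorem pv_meas_lt_fuel (start : String) (adj : List (String × List (String × Int)))
    (vis : PySem.Set String) : pvMeas start adj vis < pvFuel start adj := by
  have h1 : pvMeas start adj vis ≤ ((pvU start adj).toFinset).card :=
    Finset.card_le_card Finset.sdiff_subset
  have h2 : ((pvU start adj).toFinset).card ≤ (pvU start adj).length :=
    List.toFinset_card_le _
  have h3 : pvFuel start adj = 1 + ((pvU start adj).map (fun v => pvW adj v + 1)).sum := by
    unfold pvFuel; rw [pv_foldl_sum]; omega
  have h4 := pv_map_sum_succ (pvW adj) (pvU start adj)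
  omega

-- every neighbour name lies in the node universe
theorem pv_items_foldl_insert_sub {α β : Type} [BEq α] [LawfulBEq α]
    (S : List (α × β)) :
    ∀ (l : List (α × β)) (d : PySem.Dict α β),
      (∀ p ∈ d.items, p ∈ S) → (∀ p ∈ l, p ∈ S) →
      ∀ p ∈ (l.foldl (fun d q => d.insert q.1 q.2) d).items, p ∈ S := by
  intro l
  induction l with
  | nil => intro d hd _ p hp; exact hd p hp
  | cons q l ih =>
    intro d hd hl p hp
    refine ih (d.insert q.1 q.2) ?_ (fun r hr => hl r (List.mem_cons_of_mem _ hr)) p hp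
    intro r hr
    rcases (PySem.Dict.mem_items_insert _ _ _ _).mp hr with h | h
    · subst h; exact hl q List.mem_cons_self
    · exact hd r h.1

theorem pv_nbrs_subU (start : String) (adj : List (String × List (String × Int)))
    {v n : String} (hn : n ∈ pvNbrs adj v) : n ∈ pvU start adj := by
  unfold pvNbrs at hn
  cases hg : (PySem.Dict.ofList adj).get? v with
  | none =>
    have hkeys : (PySem.Dict.ofList (((PySem.Dict.ofList adj).get? v).getD [])).keys = ([] : List String) := by
      rw [hg]; rfl
    rw [hkeys] at hn
    exact absurd hn (List.not_mem_nil)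
  | some inner =>
    rw [hg] at hn
    rw [show ((some inner).getD ([] : List (String × Int))) = inner from rfl] at hn
    -- (v, inner) is an item of ofList adj, hence a pair of adj
    have hitem : (v, inner) ∈ (PySem.Dict.ofList adj).items :=
      PySem.Dict.mem_items_of_get?_eq_some _ hg
    have hofl : PySem.Dict.ofList adj =
        adj.foldl (fun d q => d.insert q.1 q.2) PySem.Dict.empty := rfl
    rw [hofl] at hitem
    have hpair : (v, inner) ∈ adj :=
      pv_items_foldl_insert_sub adj adj PySem.Dict.empty (by simp [PySem.Dict.empty]) (fun p hp => hp) _ hitem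
    -- n is a key of ofList inner, hence a first component of inner
    simp only [PySem.Dict.keys, List.mem_map] at hn
    obtain ⟨⟨k, w⟩, hkw, hk⟩ := hn
    have hofl2 : PySem.Dict.ofList inner =
        inner.foldl (fun d q => d.insert q.1 q.2) PySem.Dict.empty := rfl
    rw [hofl2] at hkw
    have hin : (k, w) ∈ inner :=
      pv_items_foldl_insert_sub inner inner PySem.Dict.empty (by simp [PySem.Dict.empty]) (fun p hp => hp) _ hkw
    subst hk
    unfold pvU
    refine List.mem_cons_of_mem _ ?_
    simp only [List.mem_flatMap]
    exact ⟨(v, inner), hpair, List.mem_map.mpr ⟨(k, w), hin, rfl⟩⟩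

-- visited only grows through pvDfs
theorem pv_fold_mono (adj : List (String × List (String × Int))) (f : Nat)
    (hf : ∀ (n : String) (st : PySem.Set String × PySem.Set String) (x : String),
      x ∈ st.1 → x ∈ (pvDfs adj f n st).1) :
    ∀ (l : List String) (st : PySem.Set String × PySem.Set String) (x : String),
      x ∈ st.1 → x ∈ (l.foldl (pvStep adj f) st).1 := by
  intro l
  induction l with
  | nil => intro st x hx; simpa using hx
  | cons m ms ih =>
    intro st x hx
    rw [List.foldl_cons]
    by_cases hc : PySem.Set.contains st.1 m
    · rw [show pvStep adj f st m = st from by unfold pvStep; rw [if_pos hc]]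
      exact ih st x hx
    · rw [show pvStep adj f st m = pvDfs adj f m st from by unfold pvStep; rw [if_neg hc]]
      exact ih _ x (hf m st x hx)

theorem pv_dfs_mono (adj : List (String × List (String × Int))) :
    ∀ (f : Nat) (n : String) (st : PySem.Set String × PySem.Set String) (x : String),
      x ∈ st.1 → x ∈ (pvDfs adj f n st).1 := by
  intro f
  induction f using Nat.strong_induction_on with
  | _ f IH =>
    intro n st x hx
    cases f with
    | zero => simpa [pvDfs] using hx
    | succ f =>
      rw [pv_dfs_succ]
      exact pv_fold_mono adj f (fun n st x hx => IH f (Nat.lt_succ_self f) n st x hx) _ _ x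
        ((PySem.Set.mem_add _ _ _).mpr (Or.inl hx))

-- fuel irrelevance: any two sufficient fuels give the same run of B's recursion
theorem pv_irrel (start : String) (adj : List (String × List (String × Int))) :
    ∀ (f g : Nat) (n : String) (st : PySem.Set String × PySem.Set String),
      n ∈ pvU start adj → n ∉ st.1 →
      pvMeas start adj st.1 ≤ f → pvMeas start adj st.1 ≤ g →
      pvDfs adj f n st = pvDfs adj g n st := by
  intro f
  induction f using Nat.strong_induction_on with
  | _ f IH =>
    intro g n st hU hn hf hg
    have hpos : 0 < pvMeas start adj st.1 := by
      apply Finset.card_pos.mpr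
      exact ⟨n, by simp [List.mem_toFinset, hU, hn]⟩
    obtain ⟨f', rfl⟩ : ∃ f', f = f' + 1 := ⟨f - 1, by omega⟩
    obtain ⟨g', rfl⟩ : ∃ g', g = g' + 1 := ⟨g - 1, by omega⟩
    rw [pv_dfs_succ, pv_dfs_succ]
    have hlt : pvMeas start adj (PySem.Set.add st.1 n) < pvMeas start adj st.1 :=
      pv_meas_add_lt start adj hU hn
    have hfold : ∀ (l : List String), (∀ m ∈ l, m ∈ pvU start adj) →
        ∀ (st2 : PySem.Set String × PySem.Set String),
          pvMeas start adj st2.1 ≤ f' → pvMeas start adj st2.1 ≤ g' →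
          l.foldl (pvStep adj f') st2 = l.foldl (pvStep adj g') st2 := by
      intro l hl
      induction l with
      | nil => intro st2 _ _; rfl
      | cons m ms ihl =>
        intro st2 h2f h2g
        rw [List.foldl_cons, List.foldl_cons]
        by_cases hc : PySem.Set.contains st2.1 m
        · rw [show pvStep adj f' st2 m = st2 from by unfold pvStep; rw [if_pos hc],
              show pvStep adj g' st2 m = st2 from by unfold pvStep; rw [if_pos hc]]
          exact ihl (fun r hr => hl r (List.mem_cons_of_mem _ hr)) st2 h2f h2g
        · have hmem : m ∉ st2.1 := fun h => hc ((PySem.Set.contains_iff st2.1 m).mpr h)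
          have heq : pvDfs adj f' m st2 = pvDfs adj g' m st2 :=
            IH f' (Nat.lt_succ_self f') g' m st2 (hl m List.mem_cons_self) hmem h2f h2g
          rw [show pvStep adj f' st2 m = pvDfs adj f' m st2 from by unfold pvStep; rw [if_neg hc],
              show pvStep adj g' st2 m = pvDfs adj g' m st2 from by unfold pvStep; rw [if_neg hc], heq]
          have hsub : ∀ x ∈ st2.1, x ∈ (pvDfs adj g' m st2).1 :=
            fun x hx => pv_dfs_mono adj g' m st2 x hx
          exact ihl (fun r hr => hl r (List.mem_cons_of_mem _ hr)) _
            (le_trans (pv_meas_le start adj hsub) h2f)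
            (le_trans (pv_meas_le start adj hsub) h2g)
    exact hfold _ (fun m hm => pv_nbrs_subU start adj (List.mem_reverse.mp hm)) _
      (by show pvMeas start adj (PySem.Set.add st.1 n) ≤ f'; omega)
      (by show pvMeas start adj (PySem.Set.add st.1 n) ≤ g'; omega)

-- fuel swap along a whole neighbour fold
theorem pv_fold_swap (start : String) (adj : List (String × List (String × Int))) (f g : Nat) :
    ∀ (l : List String), (∀ m ∈ l, m ∈ pvU start adj) →
      ∀ (st : PySem.Set String × PySem.Set String),
        pvMeas start adj st.1 ≤ f → pvMeas start adj st.1 ≤ g →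
        l.foldl (pvStep adj f) st = l.foldl (pvStep adj g) st := by
  intro l hl
  induction l with
  | nil => intro st _ _; rfl
  | cons m ms ih =>
    intro st hf hg
    rw [List.foldl_cons, List.foldl_cons]
    by_cases hc : PySem.Set.contains st.1 m
    · rw [show pvStep adj f st m = st from by unfold pvStep; rw [if_pos hc],
          show pvStep adj g st m = st from by unfold pvStep; rw [if_pos hc]]
      exact ih (fun r hr => hl r (List.mem_cons_of_mem _ hr)) st hf hg
    · have hmem : m ∉ st.1 := fun h => hc ((PySem.Set.contains_iff st.1 m).mpr h)
      have heq : pvDfs adj f m st = pvDfs adj g m st :=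
        pv_irrel start adj f g m st (hl m List.mem_cons_self) hmem hf hg
      rw [show pvStep adj f st m = pvDfs adj f m st from by unfold pvStep; rw [if_neg hc],
          show pvStep adj g st m = pvDfs adj g m st from by unfold pvStep; rw [if_neg hc], heq]
      have hsub : ∀ x ∈ st.1, x ∈ (pvDfs adj g m st).1 :=
        fun x hx => pv_dfs_mono adj g m st x hx
      exact ih (fun r hr => hl r (List.mem_cons_of_mem _ hr)) _
        (le_trans (pv_meas_le start adj hsub) hf)
        (le_trans (pv_meas_le start adj hsub) hg)

-- already-visited elements may be dropped from a neighbour fold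
theorem pv_fold_filter (adj : List (String × List (String × Int))) (F : Nat)
    (vis0 : PySem.Set String) :
    ∀ (l : List String) (st : PySem.Set String × PySem.Set String),
      (∀ x ∈ vis0, x ∈ st.1) →
      l.foldl (pvStep adj F) st = (l.filter (fun n => !PySem.Set.contains vis0 n)).foldl (pvStep adj F) st := by
  intro l
  induction l with
  | nil => intro st _; rfl
  | cons m ms ih =>
    intro st hsub
    by_cases hm : PySem.Set.contains vis0 m
    · have hmst : PySem.Set.contains st.1 m = true :=
        (PySem.Set.contains_iff st.1 m).mpr (hsub m ((PySem.Set.contains_iff vis0 m).mp hm))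
      rw [List.filter_cons_of_neg (by rw [hm]; decide), List.foldl_cons,
          show pvStep adj F st m = st from by unfold pvStep; rw [if_pos hmst]]
      exact ih st hsub
    · have hm' : PySem.Set.contains vis0 m = false := by
        cases h : PySem.Set.contains vis0 m
        · rfl
        · exact absurd h hm
      rw [List.filter_cons_of_pos (by rw [hm']; decide), List.foldl_cons, List.foldl_cons]
      apply ih
      intro x hx
      by_cases hc : PySem.Set.contains st.1 m
      · rw [show pvStep adj F st m = st from by unfold pvStep; rw [if_pos hc]]; exact hsub x hx
      · rw [show pvStep adj F st m = pvDfs adj F m st from by unfold pvStep; rw [if_neg hc]]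
        exact pv_dfs_mono adj F m st x (hsub x hx)

-- the J-invariant: every already-visited entry of the stack has all its neighbours either
-- visited or strictly above it on the stack
def pvJ (adj : List (String × List (String × Int))) (q : List String) (vis : PySem.Set String) : Prop :=
  ∀ q1 v q2, q = q1 ++ v :: q2 → v ∈ vis → ∀ n ∈ pvNbrs adj v, n ∈ vis ∨ n ∈ q2

-- work potential of A's loop state
def pvPhi (start : String) (adj : List (String × List (String × Int)))
    (q : List String) (vis : PySem.Set String) : Nat :=
  q.length + ∑ v ∈ (pvU start adj).toFinset \ vis.toFinset, pvW adj v

-- the simulation: A's worklist loop equals folding B's recursion over the stack top-first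
theorem pv_main (start : String) (adj : List (String × List (String × Int))) :
    ∀ (f : Nat) (q : List String) (vis keys : PySem.Set String),
      (∀ v ∈ vis, pvIslower v → v ∈ keys) →
      pvJ adj q vis →
      (∀ x ∈ q, x ∈ pvU start adj) →
      pvPhi start adj q vis ≤ f →
      pvLoopA adj f q vis keys =
        (q.reverse.foldl (pvStep adj (pvFuel start adj)) (vis, keys)).2 := by
  intro f
  induction f with
  | zero =>
    intro q vis keys _ _ _ hphi
    have hq : q = [] := by
      have : q.length = 0 := by unfold pvPhi at hphi; omega
      exact List.length_eq_zero_iff.mp this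
    subst hq; rfl
  | succ f ih =>
    intro q vis keys h1 hJ hU hphi
    rw [pvLoopA]
    cases hpop : PySem.List.pop? q with
    | none =>
      have hq : q = [] := pv_pop_none hpop
      subst hq; rfl
    | some r =>
      obtain ⟨e, q'⟩ := r
      have hq : q = q' ++ [e] := pv_pop_inv hpop
      have hrev : q.reverse = e :: q'.reverse := by rw [hq]; simp
      have heU : e ∈ pvU start adj := hU e (by rw [hq]; simp)
      dsimp only
      by_cases he : e ∈ vis
      · -- duplicate pop: a no-op on A's side, a skip on B's side
        have hc : PySem.Set.contains vis e = true := (PySem.Set.contains_iff vis e).mpr he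
        have hnb : ∀ n ∈ pvNbrs adj e, n ∈ vis := by
          intro n hn
          rcases hJ q' e [] (by simpa using hq) he n hn with h | h
          · exact h
          · simp at h
        have hvis' : PySem.Set.add vis e = vis := PySem.Set.add_of_mem he
        have hkeys' : (if pvIslower e then PySem.Set.add keys e else keys) = keys := by
          split_ifs with hl
          · exact PySem.Set.add_of_mem (h1 e he hl)
          · rfl
        have hfilter : (pvNbrs adj e).filter (fun n => !PySem.Set.contains (PySem.Set.add vis e) n) = [] := by
          rw [List.filter_eq_nil_iff]
          intro n hn
          simp [hvis', hnb n hn]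
        rw [hkeys', hfilter, hvis', List.append_nil, hrev, List.foldl_cons,
            show pvStep adj (pvFuel start adj) (vis, keys) e = (vis, keys) from by unfold pvStep; rw [if_pos hc]]
        refine ih q' vis keys h1 ?_ (fun x hx => hU x (by rw [hq]; exact List.mem_append_left _ hx)) ?_
        · intro q1 v q2 hsplit hv n hn
          rcases hJ q1 v (q2 ++ [e]) (by rw [hq, hsplit]; simp) hv n hn with h | h
          · exact Or.inl h
          · rcases List.mem_append.mp h with h | h
            · exact Or.inr h
            · simp at h; subst h; exact Or.inl he
        · have : q.length = q'.length + 1 := by rw [hq]; simp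
          unfold pvPhi at *; omega
      · -- fresh pop
        have hc : ¬ (PySem.Set.contains vis e = true) := fun h => he ((PySem.Set.contains_iff vis e).mp h)
        set vis' := PySem.Set.add vis e with hvis'
        set keys' := if pvIslower e then PySem.Set.add keys e else keys with hkeys'
        set P := (pvNbrs adj e).filter (fun n => !PySem.Set.contains vis' n) with hP
        have hmemvis' : ∀ x, x ∈ vis' ↔ x ∈ vis ∨ x = e := fun x => PySem.Set.mem_add vis e x
        -- the whole recursive call pvDfs equals processing P on top of the stack
        have hF1 : ∃ F', pvFuel start adj = F' + 1 := ⟨pvFuel start adj - 1, by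
          have := pv_meas_lt_fuel start adj vis; omega⟩
        obtain ⟨F', hF⟩ := hF1
        have hmvis : pvMeas start adj vis < pvFuel start adj := pv_meas_lt_fuel start adj vis
        have hmvis' : pvMeas start adj vis' < pvMeas start adj vis := pv_meas_add_lt start adj heU he
        have hcall : pvStep adj (pvFuel start adj) (vis, keys) e =
            P.reverse.foldl (pvStep adj (pvFuel start adj)) (vis', keys') := by
          rw [show pvStep adj (pvFuel start adj) (vis, keys) e = pvDfs adj (pvFuel start adj) e (vis, keys) from by
                unfold pvStep; rw [if_neg hc], hF, pv_dfs_succ]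
          have hfilt : ((pvNbrs adj e).reverse).foldl (pvStep adj F') (vis', keys') =
              (((pvNbrs adj e).reverse).filter (fun n => !PySem.Set.contains vis' n)).foldl
                (pvStep adj F') (vis', keys') := by
            apply pv_fold_filter
            intro x hx; exact hx
          have hrevfilt : ((pvNbrs adj e).reverse).filter (fun n => !PySem.Set.contains vis' n) = P.reverse := by
            rw [hP, List.filter_reverse]
          rw [hfilt, hrevfilt]
          apply pv_fold_swap
          · intro m hm; exact pv_nbrs_subU start adj ((List.mem_filter.mp (List.mem_reverse.mp hm)).1)
          · simp only []; omega
          · simp only []; omega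
        rw [hrev, List.foldl_cons, hcall, ← List.foldl_append, ← List.reverse_append]
        refine ih (q' ++ P) vis' keys' ?_ ?_ ?_ ?_
        · intro v hv hl
          rcases (hmemvis' v).mp hv with h | h
          · have := h1 v h hl
            rw [hkeys']; split_ifs with _
            · exact (PySem.Set.mem_add keys e v).mpr (Or.inl this)
            · exact this
          · subst h
            rw [hkeys', if_pos hl]
            exact (PySem.Set.mem_add keys v v).mpr (Or.inr rfl)
        · -- J is preserved
          intro q1 v q2 hsplit hv n hn
          have hPmem : ∀ x, x ∈ P → x ∉ vis' := by
            intro x hx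
            exact (pv_mem_filter_not_contains.mp hx).2
          have hvP : v ∉ P := fun h => hPmem v h hv
          obtain ⟨q2a, hq'2, hq2⟩ := pv_split_append hsplit hvP
          rcases (hmemvis' v).mp hv with hvold | hveq
          · rcases hJ q1 v (q2a ++ [e]) (by rw [hq, hq'2]; simp) hvold n hn with h | h
            · exact Or.inl ((hmemvis' n).mpr (Or.inl h))
            · rcases List.mem_append.mp h with h | h
              · exact Or.inr (hq2 ▸ List.mem_append_left _ h)
              · simp at h; subst h
                exact Or.inl ((hmemvis' n).mpr (Or.inr rfl))
          · subst hveq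
            by_cases hnv : n ∈ vis'
            · exact Or.inl hnv
            · refine Or.inr (hq2 ▸ List.mem_append_right _ ?_)
              exact pv_mem_filter_not_contains.mpr ⟨hn, hnv⟩
        · intro x hx
          rcases List.mem_append.mp hx with h | h
          · exact hU x (by rw [hq]; exact List.mem_append_left _ h)
          · exact pv_nbrs_subU start adj (List.mem_filter.mp h).1
        · -- the potential drops
          have hqlen : q.length = q'.length + 1 := by rw [hq]; simp
          have heT : e ∈ (pvU start adj).toFinset \ vis.toFinset := by
            simp [List.mem_toFinset, heU, he]
          have hT' : (pvU start adj).toFinset \ vis'.toFinset =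
              ((pvU start adj).toFinset \ vis.toFinset).erase e := by
            rw [hvis', pv_toFinset_add, Finset.sdiff_insert]
          have hsum : (∑ v ∈ ((pvU start adj).toFinset \ vis.toFinset).erase e, pvW adj v) + pvW adj e =
              ∑ v ∈ (pvU start adj).toFinset \ vis.toFinset, pvW adj v :=
            Finset.sum_erase_add _ _ heT
          have hPlen : P.length ≤ pvW adj e := by
            rw [hP]; exact le_trans (List.length_filter_le _ _) (le_refl _)
          unfold pvPhi at *
          rw [hT']
          simp only [List.length_append] at *
          omega

-- ===== VERDICT (by name: the statement is the Claim_ definition above) =====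
theorem get_keys_per_region_spec : Claim_equal_get_keys_per_region := by
  intro start adj _ _
  unfold Spec_get_keys_per_region get_keys_per_region get_keys_per_region_alt
  have hstart : start ∈ pvU start adj := List.mem_cons_self
  have hmain := pv_main start adj (pvFuel start adj) [start] PySem.Set.empty PySem.Set.empty
    (by intro v hv; simp [PySem.Set.empty] at hv)
    (by intro q1 v q2 _ hv; simp [PySem.Set.empty] at hv)
    (by intro x hx; simp at hx; subst hx; exact hstart)
    (by
      unfold pvPhi
      have h1 : (∑ v ∈ (pvU start adj).toFinset \ (PySem.Set.empty : PySem.Set String).toFinset, pvW adj v)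
          ≤ ((pvU start adj).map (pvW adj)).sum := by
        rw [show (PySem.Set.empty : PySem.Set String).toFinset = (∅ : Finset String) from rfl,
           Finset.sdiff_empty]
        exact pv_finsum_le (pvW adj) (pvU start adj)
      have h2 := pv_map_sum_succ (pvW adj) (pvU start adj)
      have h3 : pvFuel start adj = 1 + ((pvU start adj).map (fun v => pvW adj v + 1)).sum := by
        unfold pvFuel; rw [pv_foldl_sum]; omega
      simp only [List.length_cons, List.length_nil]
      omega)
  rw [hmain]
  have hc0 : PySem.Set.contains (PySem.Set.empty : PySem.Set String) start = false := rfl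
  have hc : ¬ (PySem.Set.contains (PySem.Set.empty : PySem.Set String) start = true) := by
    rw [hc0]; exact Bool.false_ne_true
  rw [List.reverse_cons]
  simp only [List.reverse_nil, List.nil_append, List.foldl_cons, List.foldl_nil]
  rw [show pvStep adj (pvFuel start adj) (PySem.Set.empty, PySem.Set.empty) start = pvDfs adj (pvFuel start adj) start (PySem.Set.empty, PySem.Set.empty) from by unfold pvStep; rw [if_neg hc]]
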